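-- pv_equiv track=rewrite | github.com/Screeen/cmvdr | src/beamformer_manager.py | get_beamformers_names
-- ===== SOURCE A (Python) =====
-- def get_beamformers_names(beamformers_names_orig, selected_variants):
--     # Add the beamformers to the dictionary, to have mvdr_oracle, mvdr_semi-oracle, mvdr_blind, etc.
--     bf_names = {}
--     for key in beamformers_names_orig.keys():
--         for variant in selected_variants:
--             bf_names[f"{key}_{variant}"] = beamformers_names_orig[key]
--
--     # Sort the beamformers such that first all the 'blind' beamformers are processed, then 'semi-oracle', and finally 'oracle'
--     # Also, first should be MVDR, then MWF, and finally CMWF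
--     # So the final order should be: 'mvdr_blind', 'mwf_blind', 'cmwf_blind', 'mvdr_semi-oracle', 'mwf_semi-oracle', 'cmwf_semi-oracle',
--     # 'mvdr_oracle', 'mwf_oracle', 'cmwf_oracle'
--     bf_names_keys = sorted(bf_names.keys(), key=lambda x: (
--         selected_variants.index(x.split('_')[1]), list(beamformers_names_orig).index(x.split('_')[0])))
--     bf_names = {key: bf_names[key] for key in bf_names_keys}
--
--     return bf_names
-- ===== SOURCE B (Python) =====
-- def get_beamformers_names(beamformers_names_orig, selected_variants):
--     # Build the dict directly in the final (variant-major) order; dict insertion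
--     # order makes the sort-by-(variant index, key index) pass unnecessary.
--     bf_names = {}
--     for variant in selected_variants:
--         for key in beamformers_names_orig:
--             bf_names[f"{key}_{variant}"] = beamformers_names_orig[key]
--     return bf_names
-- ===== Notes on version B (the rewrite author's own statement) =====
-- stated objective: faster
-- what changed: B builds the dict directly in the final variant-major insertion order (outer loop over selected_variants, inner over keys), eliminating A's build-then-sort pass whose comparison key re-splits each composite name and rescans both lists with .index.
import Mathlib
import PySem

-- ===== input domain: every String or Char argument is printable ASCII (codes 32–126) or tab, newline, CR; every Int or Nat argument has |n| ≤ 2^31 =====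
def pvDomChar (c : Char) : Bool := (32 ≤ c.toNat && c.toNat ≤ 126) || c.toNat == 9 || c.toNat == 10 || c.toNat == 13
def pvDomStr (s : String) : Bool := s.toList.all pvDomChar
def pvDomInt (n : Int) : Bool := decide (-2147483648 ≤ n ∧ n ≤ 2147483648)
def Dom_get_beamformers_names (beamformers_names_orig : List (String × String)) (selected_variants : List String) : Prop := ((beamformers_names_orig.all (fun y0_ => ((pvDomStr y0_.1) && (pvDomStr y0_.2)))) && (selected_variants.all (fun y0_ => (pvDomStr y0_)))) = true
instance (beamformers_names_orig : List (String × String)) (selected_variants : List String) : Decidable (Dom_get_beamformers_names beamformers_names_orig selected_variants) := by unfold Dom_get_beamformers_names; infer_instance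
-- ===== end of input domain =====

-- B builds the result dict directly in the final (variant-major) insertion order, making A's
-- build-then-sort pass (with its per-key split/.index scans) unnecessary.

-- ===== PORT A =====
def get_beamformers_names (beamformers_names_orig : List (String × String)) (selected_variants : List String) : List (String × String) :=
  let d := PySem.Dict.ofList beamformers_names_orig
  let bf := d.keys.foldl (fun acc k =>
      selected_variants.foldl (fun acc2 v => acc2.insert (k ++ "_" ++ v) (d.getD k "")) acc)
    PySem.Dict.empty
  let bfKeys := PySem.List.sorted2 bf.keys
      (fun x => (PySem.List.index? selected_variants (PySem.List.pyGetD ((PySem.Str.split? x "_").getD []) 1 "")).getD 0)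
      (fun x => (PySem.List.index? d.keys (PySem.List.pyGetD ((PySem.Str.split? x "_").getD []) 0 "")).getD 0)
  (bfKeys.foldl (fun acc k => acc.insert k (bf.getD k "")) PySem.Dict.empty).items

-- ===== PORT B =====
def get_beamformers_names_alt (beamformers_names_orig : List (String × String)) (selected_variants : List String) : List (String × String) :=
  let d := PySem.Dict.ofList beamformers_names_orig
  (selected_variants.foldl (fun acc v =>
      d.keys.foldl (fun acc2 k => acc2.insert (k ++ "_" ++ v) (d.getD k "")) acc)
    PySem.Dict.empty).items

-- ===== PRECONDITION & SPEC =====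
-- Pre_ excludes inputs with '_' in a key or variant: there A's split('_')-based sort keys
-- usually raise ValueError, and where they happen not to, A's resulting order is an accident of
-- its sort — a corner no caller of this dict-of-beamformer-names helper exercises.
def Pre_get_beamformers_names (beamformers_names_orig : List (String × String)) (selected_variants : List String) : Prop :=
  beamformers_names_orig = [] ∨ selected_variants = [] ∨
  ((∀ p ∈ beamformers_names_orig, '_' ∉ p.1.toList) ∧
   (∀ s ∈ selected_variants, '_' ∉ s.toList))
instance (beamformers_names_orig : List (String × String)) (selected_variants : List String) : Decidable (Pre_get_beamformers_names beamformers_names_orig selected_variants) := by unfold Pre_get_beamformers_names; infer_instance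

def pvWitness_get_beamformers_names : (List (String × String)) × List String :=
  ([("mvdr", "MVDR beamformer"), ("mwf", "MWF beamformer"), ("cmwf", "CMWF beamformer")],
   ["blind", "semi-oracle", "oracle"])

def Spec_get_beamformers_names (beamformers_names_orig : List (String × String)) (selected_variants : List String) (out : List (String × String)) : Prop := out = get_beamformers_names_alt beamformers_names_orig selected_variants
instance (beamformers_names_orig : List (String × String)) (selected_variants : List String) (out : List (String × String)) : Decidable (Spec_get_beamformers_names beamformers_names_orig selected_variants out) := by unfold Spec_get_beamformers_names; infer_instance

-- ===== CLAIM (what is proved, stated in full; the proofs are below) =====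
def Claim_equal_get_beamformers_names : Prop := ∀ (beamformers_names_orig : List (String × String)) (selected_variants : List String), Dom_get_beamformers_names beamformers_names_orig selected_variants → Pre_get_beamformers_names beamformers_names_orig selected_variants → Spec_get_beamformers_names beamformers_names_orig selected_variants (get_beamformers_names beamformers_names_orig selected_variants)

-- ===== LEMMAS AND PROOFS =====

def pvNew {α : Type} [DecidableEq α] : List α → List α → List α
  | [], _ => []
  | v :: t, S => if v ∈ S then pvNew t S else v :: pvNew t (v :: S)

theorem pvNew_congr {α : Type} [DecidableEq α] :
    ∀ (l S S' : List α), (∀ v ∈ l, v ∈ S ↔ v ∈ S') → pvNew l S = pvNew l S'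
  | [], _, _, _ => rfl
  | v :: t, S, S', h => by
    by_cases hv : v ∈ S
    · have hv' : v ∈ S' := (h v (by simp)).1 hv
      simp only [pvNew, if_pos hv, if_pos hv']
      exact pvNew_congr t S S' (fun w hw => h w (by simp [hw]))
    · have hv' : v ∉ S' := fun c => hv ((h v (by simp)).2 c)
      simp only [pvNew, if_neg hv, if_neg hv']
      congr 1
      exact pvNew_congr t (v :: S) (v :: S') (fun w hw => by
        simp only [List.mem_cons]
        exact or_congr Iff.rfl (h w (by simp [hw])))

theorem mem_pvNew {α : Type} [DecidableEq α] :
    ∀ (l S : List α) (x : α), x ∈ pvNew l S ↔ x ∈ l ∧ x ∉ S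
  | [], S, x => by simp [pvNew]
  | v :: t, S, x => by
    by_cases hv : v ∈ S
    · simp only [pvNew, if_pos hv, mem_pvNew t S x, List.mem_cons]
      constructor
      · rintro ⟨h1, h2⟩; exact ⟨Or.inr h1, h2⟩
      · rintro ⟨h1 | h1, h2⟩
        · exact absurd (h1 ▸ hv) h2
        · exact ⟨h1, h2⟩
    · simp only [pvNew, if_neg hv, List.mem_cons, mem_pvNew t (v :: S) x, List.mem_cons]
      constructor
      · rintro (rfl | ⟨h1, h2⟩)
        · exact ⟨Or.inl rfl, hv⟩
        · exact ⟨Or.inr h1, fun c => h2 (Or.inr c)⟩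
      · rintro ⟨rfl | h1, h2⟩
        · exact Or.inl rfl
        · by_cases hxv : x = v
          · exact Or.inl hxv
          · exact Or.inr ⟨h1, fun c => by rcases c with c | c; exact hxv c; exact h2 c⟩

theorem pvNew_append {α : Type} [DecidableEq α] :
    ∀ (l₁ l₂ S : List α), pvNew (l₁ ++ l₂) S = pvNew l₁ S ++ pvNew l₂ (l₁ ++ S)
  | [], l₂, S => by simp [pvNew]
  | v :: t, l₂, S => by
    by_cases hv : v ∈ S
    · simp only [List.cons_append, pvNew, if_pos hv, pvNew_append t l₂ S]
      congr 1
      refine pvNew_congr _ _ _ (fun w _ => by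
        simp only [List.mem_append, List.mem_cons]
        constructor
        · intro h; exact Or.inr h
        · rintro (rfl | h); exact Or.inr hv; exact h)
    · simp only [List.cons_append, pvNew, if_neg hv, pvNew_append t l₂ (v :: S), List.cons_append]
      congr 2
      exact pvNew_congr _ _ _ (fun w _ => by simp only [List.mem_append, List.mem_cons]; tauto)

theorem pvNew_of_forall_mem {α : Type} [DecidableEq α] :
    ∀ (l S : List α), (∀ v ∈ l, v ∈ S) → pvNew l S = []
  | [], _, _ => rfl
  | v :: t, S, h => by
    simp only [pvNew, if_pos (h v (by simp))]
    exact pvNew_of_forall_mem t S (fun w hw => h w (by simp [hw]))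

theorem pvNew_of_nodup {α : Type} [DecidableEq α] :
    ∀ (l S : List α), l.Nodup → (∀ v ∈ l, v ∉ S) → pvNew l S = l
  | [], _, _, _ => rfl
  | v :: t, S, hnd, h => by
    simp only [pvNew, if_neg (h v (by simp))]
    congr 1
    refine pvNew_of_nodup t (v :: S) (List.Nodup.of_cons hnd) (fun w hw => ?_)
    simp only [List.mem_cons]
    rintro (rfl | c)
    · exact (List.nodup_cons.1 hnd).1 hw
    · exact h w (by simp [hw]) c

theorem pvNew_map {α β : Type} [DecidableEq α] [DecidableEq β] (f : α → β) :
    ∀ (l : List α) (S : List β) (T : List α), (∀ v ∈ l, ∀ w ∈ l, f v = f w → v = w) →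
      (∀ v ∈ l, (f v ∈ S ↔ v ∈ T)) → pvNew (l.map f) S = (pvNew l T).map f
  | [], _, _, _, _ => rfl
  | v :: t, S, T, hinj, h => by
    by_cases hv : v ∈ T
    · have hfv : f v ∈ S := (h v (by simp)).2 hv
      simp only [List.map_cons, pvNew, if_pos hfv, if_pos hv]
      exact pvNew_map f t S T (fun a ha b hb => hinj a (by simp [ha]) b (by simp [hb]))
        (fun w hw => h w (by simp [hw]))
    · have hfv : f v ∉ S := fun c => hv ((h v (by simp)).1 c)
      simp only [List.map_cons, pvNew, if_neg hfv, if_neg hv, List.map_cons]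
      congr 1
      refine pvNew_map f t (f v :: S) (v :: T) (fun a ha b hb => hinj a (by simp [ha]) b (by simp [hb])) (fun w hw => ?_)
      simp only [List.mem_cons]
      constructor
      · rintro (he | hs)
        · exact Or.inl (hinj w (by simp [hw]) v (by simp) he)
        · exact Or.inr ((h w (by simp [hw])).1 hs)
      · rintro (rfl | ht)
        · exact Or.inl rfl
        · exact Or.inr ((h w (by simp [hw])).2 ht)

theorem pvNew_pairwise_idx {α : Type} [DecidableEq α] :
    ∀ (l S : List α), (pvNew l S).Pairwise (fun a b => l.idxOf a < l.idxOf b)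
  | [], S => by simp [pvNew]
  | v :: t, S => by
    have step : ∀ (x : α), x ≠ v → (v :: t).idxOf x = t.idxOf x + 1 := fun x hx => by
      have : (v == x) = false := beq_eq_false_iff_ne.2 (Ne.symm hx)
      simp [List.idxOf_cons, this]
    by_cases hv : v ∈ S
    · simp only [pvNew, if_pos hv]
      refine ((pvNew_pairwise_idx t S).imp_of_mem ?_)
      intro a b ha hb hab
      have hav : a ≠ v := fun c => ((mem_pvNew t S a).1 ha).2 (c ▸ hv)
      have hbv : b ≠ v := fun c => ((mem_pvNew t S b).1 hb).2 (c ▸ hv)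
      rw [step a hav, step b hbv]; omega
    · simp only [pvNew, if_neg hv]
      refine List.Pairwise.cons ?_ ?_
      · intro b hb
        have hbv : b ≠ v := fun c => ((mem_pvNew t (v :: S) b).1 hb).2 (by simp [c])
        rw [step b hbv]
        simp
      · refine ((pvNew_pairwise_idx t (v :: S)).imp_of_mem ?_)
        intro a b ha hb hab
        have hav : a ≠ v := fun c => ((mem_pvNew t _ a).1 ha).2 (by simp [c])
        have hbv : b ≠ v := fun c => ((mem_pvNew t _ b).1 hb).2 (by simp [c])
        rw [step a hav, step b hbv]; omega

theorem pvNew_nodup {α : Type} [DecidableEq α] (l S : List α) : (pvNew l S).Nodup :=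
  (pvNew_pairwise_idx l S).imp (fun h => fun e => by subst e; omega)

theorem pvDict_foldl_insert_items {β : Type} [DecidableEq β] (g : β → String) (h : β → String) :
    ∀ (l : List β) (d : PySem.Dict String String) (S : List β),
      d.keys.Nodup →
      (∀ v ∈ l, (d.contains (g v) = true ↔ v ∈ S)) →
      (∀ v ∈ l, ∀ w ∈ l, g v = g w → v = w) →
      (∀ v ∈ l, v ∈ S → d.get? (g v) = some (h v)) →
      (l.foldl (fun d2 v => d2.insert (g v) (h v)) d).items
        = d.items ++ (pvNew l S).map (fun v => (g v, h v))
  | [], d, S, _, _, _, _ => by simp [pvNew]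
  | v :: t, d, S, hnd, hc, hinj, hg => by
    by_cases hv : v ∈ S
    · have hcv : d.contains (g v) = true := (hc v (by simp)).2 hv
      have habs : d.insert (g v) (h v) = d := by
        apply PySem.Dict.ext
        rw [PySem.Dict.items_insert_of_contains d (h v) hcv]
        rw [show d.items = d.items.map id from (List.map_id d.items).symm]
        rw [List.map_map]
        apply List.map_congr_left
        intro p hp
        simp only [Function.comp_apply, id_eq]
        by_cases hpk : (p.1 == g v) = true
        · rw [if_pos hpk]
          have hp1 : p.1 = g v := by simpa using hpk
          have h2 : d.get? p.1 = some p.2 := PySem.Dict.get?_of_mem_items d (by simpa using hp) hnd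
          rw [hp1, hg v (by simp) hv] at h2
          have h3 : h v = p.2 := by simpa using h2
          rw [← hp1, h3]
        · rw [if_neg hpk]
      simp only [List.foldl_cons, habs, pvNew, if_pos hv]
      exact pvDict_foldl_insert_items g h t d S hnd (fun w hw => hc w (by simp [hw]))
        (fun a ha b hb => hinj a (by simp [ha]) b (by simp [hb])) (fun w hw => hg w (by simp [hw]))
    · have hcv : d.contains (g v) = false := by
        rcases Bool.eq_false_or_eq_true (d.contains (g v)) with h' | h'
        · exact absurd ((hc v (by simp)).1 h') hv
        · exact h' 
      have hitems : (d.insert (g v) (h v)).items = d.items ++ [(g v, h v)] :=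
        PySem.Dict.items_insert_of_not_contains d (h v) hcv
      have hnd' : (d.insert (g v) (h v)).keys.Nodup := PySem.Dict.nodup_keys_insert d _ _ hnd
      simp only [List.foldl_cons, pvNew, if_neg hv]
      rw [pvDict_foldl_insert_items g h t (d.insert (g v) (h v)) (v :: S) hnd'
        (fun w hw => by
          rw [PySem.Dict.contains_insert]
          simp only [List.mem_cons, Bool.or_eq_true, beq_iff_eq]
          constructor
          · rintro (he | hs)
            · exact Or.inl (hinj w (by simp [hw]) v (by simp) he)
            · exact Or.inr ((hc w (by simp [hw])).1 hs)
          · rintro (rfl | hs)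
            · exact Or.inl rfl
            · exact Or.inr ((hc w (by simp [hw])).2 hs))
        (fun a ha b hb => hinj a (by simp [ha]) b (by simp [hb]))
        (fun w hw hwS => by
          rcases List.mem_cons.1 hwS with rfl | hwS
          · exact PySem.Dict.get?_insert_self d _ _
          · have hne : g w ≠ g v := fun c => hv (hinj w (by simp [hw]) v (by simp) c ▸ hwS)
            rw [PySem.Dict.get?_insert_of_ne d _ hne]
            exact hg w (by simp [hw]) hwS)]
      rw [hitems]
      simp [List.append_assoc]

theorem pvGo_no_sep :
    ∀ (dd : List Char), '_' ∉ dd → ∀ (fuel : Nat) (cur : List Char) (acc : List (List Char)),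
      dd.length ≤ fuel →
      PySem.Chars.splitOn.go ['_'] fuel dd cur acc = acc.reverse ++ [cur.reverse ++ dd]
  | [], _, fuel, cur, acc, _ => by
    cases fuel <;> simp [PySem.Chars.splitOn.go]
  | c :: rest, hns, fuel, cur, acc, hf => by
    have hc : c ≠ '_' := fun e => hns (by simp [e])
    cases fuel with
    | zero => simp at hf
    | succ f =>
      have hpre : List.isPrefixOf ['_'] (c :: rest) = false := by
        simp [List.isPrefixOf, Ne.symm hc]
      rw [PySem.Chars.splitOn.go]
      simp only [hpre, Bool.false_eq_true]
      rw [pvGo_no_sep rest (fun m => hns (by simp [m])) f (c :: cur) acc (by simpa using hf)]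
      simp

theorem pvGo_mid :
    ∀ (cc : List Char), '_' ∉ cc → ∀ (fuel : Nat) (rest cur : List Char) (acc : List (List Char)),
      cc.length < fuel →
      PySem.Chars.splitOn.go ['_'] fuel (cc ++ '_' :: rest) cur acc
        = PySem.Chars.splitOn.go ['_'] (fuel - (cc.length + 1)) rest [] ((cur.reverse ++ cc) :: acc)
  | [], _, fuel, rest, cur, acc, hf => by
    cases fuel with
    | zero => simp at hf
    | succ f =>
      rw [List.nil_append, PySem.Chars.splitOn.go]
      have hpre : List.isPrefixOf ['_'] ('_' :: rest) = true := by simp [List.isPrefixOf]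
      simp [hpre]
  | c :: cc, hns, fuel, rest, cur, acc, hf => by
    have hc : c ≠ '_' := fun e => hns (by simp [e])
    cases fuel with
    | zero => simp at hf
    | succ f =>
      have hpre : List.isPrefixOf ['_'] (c :: (cc ++ '_' :: rest)) = false := by
        simp [List.isPrefixOf, Ne.symm hc]
      rw [List.cons_append, PySem.Chars.splitOn.go]
      simp only [if_neg (by simp [hpre] : ¬ (List.isPrefixOf ['_'] (c :: (cc ++ '_' :: rest)) = true))]
      rw [pvGo_mid cc (fun m => hns (by simp [m])) f rest (c :: cur) acc (by simp only [List.length_cons] at hf; omega)]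

      have : f - (cc.length + 1) = f + 1 - ((c :: cc).length + 1) := by simp only [List.length_cons]; omega
      rw [this]
      simp

theorem pvSplitOn_comp (cc dd : List Char) (h1 : '_' ∉ cc) (h2 : '_' ∉ dd) :
    PySem.Chars.splitOn (cc ++ '_' :: dd) ['_'] = [cc, dd] := by
  unfold PySem.Chars.splitOn
  rw [pvGo_mid cc h1 _ dd [] [] (by simp only [List.length_append, List.length_cons]; omega)]
  rw [List.reverse_nil, List.nil_append]
  rw [pvGo_no_sep dd h2 _ [] [cc] (by simp only [List.length_append, List.length_cons]; omega)]
  simp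

theorem pvComp_toList (k v : String) : (k ++ "_" ++ v).toList = k.toList ++ '_' :: v.toList := by
  simp [String.toList_append]

theorem pvSplit_comp (k v : String) (h1 : '_' ∉ k.toList) (h2 : '_' ∉ v.toList) :
    (PySem.Str.split? (k ++ "_" ++ v) "_").getD [] = [k, v] := by
  unfold PySem.Str.split?
  have hsep : ("_" : String).toList = ['_'] := rfl
  rw [pvComp_toList, hsep]
  unfold PySem.Chars.split?
  simp [pvSplitOn_comp k.toList v.toList h1 h2, String.ofList_toList]

theorem pvUnderscore_split :
    ∀ (c₁ c₂ d₁ d₂ : List Char), '_' ∉ c₁ → '_' ∉ c₂ →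
      c₁ ++ '_' :: d₁ = c₂ ++ '_' :: d₂ → c₁ = c₂ ∧ d₁ = d₂
  | [], [], d₁, d₂, _, _, h => ⟨rfl, by simpa using h⟩
  | [], c :: c₂, d₁, d₂, _, h2, h => by
    simp only [List.nil_append, List.cons_append, List.cons.injEq] at h
    exact absurd (show '_' ∈ c :: c₂ by simp [← h.1]) h2
  | c :: c₁, [], d₁, d₂, h1, _, h => by
    simp only [List.cons_append, List.nil_append, List.cons.injEq] at h
    exact absurd (show '_' ∈ c :: c₁ by simp [h.1]) h1
  | c :: c₁, c' :: c₂, d₁, d₂, h1, h2, h => by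
    simp only [List.cons_append, List.cons.injEq] at h
    have := pvUnderscore_split c₁ c₂ d₁ d₂ (fun m => h1 (by simp [m])) (fun m => h2 (by simp [m])) h.2
    exact ⟨by rw [h.1, this.1], this.2⟩

theorem pvComp_inj (k v k' v' : String) (h1 : '_' ∉ k.toList) (h2 : '_' ∉ k'.toList)
    (h : k ++ "_" ++ v = k' ++ "_" ++ v') : k = k' ∧ v = v' := by
  have := congrArg String.toList h
  rw [pvComp_toList, pvComp_toList] at this
  have h' := pvUnderscore_split k.toList k'.toList v.toList v'.toList h1 h2 this
  constructor
  · have := congrArg String.ofList h'.1; simpa [String.ofList_toList] using this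
  · have := congrArg String.ofList h'.2; simpa [String.ofList_toList] using this

theorem pvLex_arith (x1 x2 y1 y2 M : Nat) (hx : x2 < M) (hy : y2 < M) :
    (x1 < y1 ∨ (x1 = y1 ∧ x2 < y2)) ↔ x1 * M + x2 < y1 * M + y2 := by
  constructor
  · rintro (h | ⟨rfl, h⟩)
    · have h1 : x1 + 1 ≤ y1 := h
      have h2 : (x1 + 1) * M ≤ y1 * M := Nat.mul_le_mul_right M h1
      have h3 : x1 * M + M ≤ y1 * M := by rw [Nat.succ_mul] at h2; omega
      omega
    · omega
  · intro h
    rcases Nat.lt_trichotomy x1 y1 with h1 | h1 | h1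
    · exact Or.inl h1
    · subst h1
      have : x2 < y2 := by
        by_contra hc
        have : y2 ≤ x2 := Nat.le_of_not_lt hc
        omega
      exact Or.inr ⟨rfl, this⟩
    · exfalso
      have h2 : (y1 + 1) * M ≤ x1 * M := Nat.mul_le_mul_right M h1
      rw [Nat.succ_mul] at h2
      omega

theorem pvInsertBy_congr {α : Type} (f g : α → α → Bool) (x : α) :
    ∀ (l : List α), (∀ y ∈ l, f x y = g x y) →
      PySem.List.insertBy f x l = PySem.List.insertBy g x l
  | [], _ => by rw [PySem.List.insertBy.eq_1, PySem.List.insertBy.eq_1]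
  | y :: ys, h => by
    rw [PySem.List.insertBy.eq_2, PySem.List.insertBy.eq_2, h y (by simp)]
    by_cases hb : g x y = true
    · simp [hb]
    · simp only [if_neg hb]
      rw [pvInsertBy_congr f g x ys (fun z hz => h z (by simp [hz]))]

theorem pvFoldl_insertBy_congr {α : Type} (f g : α → α → Bool) :
    ∀ (xs acc : List α),
      (∀ a ∈ xs, ∀ b ∈ acc, f a b = g a b) → (∀ a ∈ xs, ∀ b ∈ xs, f a b = g a b) →
      xs.foldl (fun acc x => PySem.List.insertBy f x acc) acc
        = xs.foldl (fun acc x => PySem.List.insertBy g x acc) acc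
  | [], acc, _, _ => rfl
  | x :: xs, acc, hacc, hxs => by
    simp only [List.foldl_cons]
    rw [pvInsertBy_congr f g x acc (fun y hy => hacc x (by simp) y hy)]
    refine pvFoldl_insertBy_congr f g xs (PySem.List.insertBy g x acc) ?_ ?_
    · intro a ha b hb
      have hb' : b = x ∨ b ∈ acc := by simpa [PySem.List.mem_insertBy] using hb
      rcases hb' with rfl | hb'
      · exact hxs a (by simp [ha]) b (by simp)
      · exact hacc a (by simp [ha]) b hb' 
    · exact fun a ha b hb => hxs a (by simp [ha]) b (by simp [hb])

theorem pvSorted2_eq_sorted (xs : List String) (k1 k2 K : String → Nat)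
    (hK : ∀ a ∈ xs, ∀ b ∈ xs,
      (decide (k1 a < k1 b) || !decide (k1 b < k1 a) && decide (k2 a < k2 b)) = decide (K a < K b)) :
    PySem.List.sorted2 xs k1 k2 = PySem.List.sorted xs K := by
  rw [PySem.List.sorted_eq_foldl_insertBy]
  unfold PySem.List.sorted2
  simp only [if_neg (by simp : ¬ (false = true))]
  exact pvFoldl_insertBy_congr _ _ xs [] (by simp) hK

theorem pvNew_prodA (variants : List String) :
    ∀ (ks : List String) (S : List (String × String)), ks.Nodup → (∀ p ∈ S, p.1 ∉ ks) →
      pvNew (ks.flatMap (fun k => variants.map (fun v => (k, v)))) S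
        = ks.flatMap (fun k => (pvNew variants []).map (fun v => (k, v)))
  | [], _, _, _ => by simp [pvNew]
  | k :: kt, S, hnd, hS => by
    rw [List.flatMap_cons, pvNew_append]
    rw [pvNew_map (fun v => (k, v)) variants S []
      (fun a _ b _ h => by simpa using congrArg Prod.snd h)
      (fun v _ => by
        constructor
        · intro hm; exact absurd (by simp : (k, v).1 ∈ k :: kt) (hS _ hm)
        · intro hm; simp at hm)]
    rw [List.flatMap_cons]
    congr 1
    refine pvNew_prodA variants kt (List.map (fun v => (k, v)) variants ++ S) (List.Nodup.of_cons hnd) ?_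
    intro p hp
    rcases List.mem_append.1 hp with hp | hp
    · rcases List.mem_map.1 hp with ⟨v, _, rfl⟩
      exact (List.nodup_cons.1 hnd).1
    · exact fun c => hS p hp (by simp [c])

theorem pvNew_prodB (ks : List String) (hnd : ks.Nodup) :
    ∀ (vs : List String) (S : List (String × String)) (T : List String),
      (∀ k v, (k, v) ∈ S ↔ (k ∈ ks ∧ v ∈ T)) →
      pvNew (vs.flatMap (fun v => ks.map (fun k => (k, v)))) S
        = (pvNew vs T).flatMap (fun v => ks.map (fun k => (k, v)))
  | [], _, _, _ => by simp [pvNew]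
  | v :: vt, S, T, hST => by
    rw [List.flatMap_cons, pvNew_append]
    by_cases hv : v ∈ T
    · rw [pvNew_map (fun k => (k, v)) ks S ks
        (fun a _ b _ h => by simpa using congrArg Prod.fst h)
        (fun k hk => by rw [hST k v]; simp [hk, hv])]
      rw [pvNew_of_forall_mem ks ks (fun _ h => h)]
      simp only [List.map_nil, List.nil_append]
      rw [show pvNew (v :: vt) T = pvNew vt T from by simp [pvNew, hv]]
      refine pvNew_prodB ks hnd vt (List.map (fun k => (k, v)) ks ++ S) T (fun k w => ?_)
      rw [List.mem_append, hST k w]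
      constructor
      · rintro (hm | hm)
        · rcases List.mem_map.1 hm with ⟨k', hk', he⟩
          obtain ⟨rfl, rfl⟩ : k' = k ∧ v = w := by constructor <;> [exact congrArg Prod.fst he; exact (congrArg Prod.snd he)]
          exact ⟨hk', hv⟩
        · exact hm
      · rintro ⟨hk, hw⟩; exact Or.inr ⟨hk, hw⟩
    · rw [pvNew_map (fun k => (k, v)) ks S []
        (fun a _ b _ h => by simpa using congrArg Prod.fst h)
        (fun k hk => by rw [hST k v]; simp [hv])]
      rw [pvNew_of_nodup ks [] hnd (by simp)]
      rw [show pvNew (v :: vt) T = v :: pvNew vt (v :: T) from by simp [pvNew, hv]]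
      rw [List.flatMap_cons]
      congr 1
      refine pvNew_prodB ks hnd vt (List.map (fun k => (k, v)) ks ++ S) (v :: T) (fun k w => ?_)
      rw [List.mem_append, hST k w]
      constructor
      · rintro (hm | hm)
        · rcases List.mem_map.1 hm with ⟨k', hk', he⟩
          obtain ⟨rfl, rfl⟩ : k' = k ∧ v = w := ⟨congrArg Prod.fst he, congrArg Prod.snd he⟩
          exact ⟨hk', by simp⟩
        · exact ⟨hm.1, by simp [hm.2]⟩
      · rintro ⟨hk, hw⟩
        rcases List.mem_cons.1 hw with rfl | hw
        · exact Or.inl (List.mem_map.2 ⟨k, hk, rfl⟩)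
        · exact Or.inr ⟨hk, hw⟩

theorem pvIdx_getD {α : Type} [DecidableEq α] (l : List α) (v : α) (h : v ∈ l) :
    (PySem.List.index? l v).getD 0 = l.idxOf v := by
  rw [PySem.List.index?_eq_idxOf?]
  have : l.idxOf? v = some (l.idxOf v) := by
    induction l with
    | nil => simp at h
    | cons a t ih =>
      by_cases hv : a = v
      · subst hv; simp [List.idxOf?_cons]
      · rcases List.mem_cons.1 h with rfl | h'
        · exact absurd rfl hv
        · simp [List.idxOf?_cons, hv, ih h']
  simp [this]

theorem pvLex_bool (x1 x2 y1 y2 M : Nat) (hx : x2 < M) (hy : y2 < M) :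
    (decide (x1 < y1) || !decide (y1 < x1) && decide (x2 < y2)) = decide (x1 * M + x2 < y1 * M + y2) := by
  apply Bool.eq_iff_iff.mpr
  simp only [Bool.or_eq_true, Bool.and_eq_true, Bool.not_eq_true', decide_eq_true_eq,
    decide_eq_false_iff_not]
  rw [← pvLex_arith x1 x2 y1 y2 M hx hy]
  omega

theorem pv_main (orig : List (String × String)) (variants : List String)
    (hk : ∀ p ∈ orig, '_' ∉ p.1.toList)
    (hv : ∀ s ∈ variants, '_' ∉ s.toList) :
    get_beamformers_names orig variants = get_beamformers_names_alt orig variants := by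
  classical
  unfold get_beamformers_names get_beamformers_names_alt
  simp only []
  set d := PySem.Dict.ofList orig with hd
  set keys := d.keys with hkeys
  set val : String → String := fun k => d.getD k "" with hval
  set dvL := pvNew variants [] with hdvL
  set comp : String → String → String := fun k v => k ++ "_" ++ v with hcomp
  -- basic membership facts
  have hkeys_nd : keys.Nodup := PySem.Dict.nodup_keys_ofList orig
  have hkeys_us : ∀ k ∈ keys, '_' ∉ k.toList := by
    intro k hkm
    have hm : k ∈ orig.map Prod.fst := by
      rw [hkeys, hd] at hkm
      unfold PySem.Dict.ofList PySem.Dict.update at hkm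
      rw [PySem.Dict.keys_foldl_insert_key orig (fun p => p.1) (fun d2 x => x.2) PySem.Dict.empty] at hkm
      have he : (PySem.Set.update (PySem.Dict.empty : PySem.Dict String String).keys
          (orig.map (fun p => p.1))) = PySem.Set.ofList (orig.map Prod.fst) := rfl
      rw [he] at hkm
      exact (PySem.Set.mem_ofList (orig.map Prod.fst) k).1 hkm
    rcases List.mem_map.1 hm with ⟨p, hp, rfl⟩
    exact hk p hp
  have hdvL_nd : dvL.Nodup := pvNew_nodup variants []
  have hdvL_mem : ∀ v ∈ dvL, v ∈ variants := fun v hvm => ((mem_pvNew variants [] v).1 hvm).1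
  have hdvL_us : ∀ v ∈ dvL, '_' ∉ v.toList := fun v hvm => hv v (hdvL_mem v hvm)
  -- pair step
  set pstep : PySem.Dict String String → String × String → PySem.Dict String String :=
    fun d2 p => d2.insert (comp p.1 p.2) (val p.1) with hpstep
  set pairsA := keys.flatMap (fun k => variants.map (fun v => (k, v))) with hpairsA
  set pairsB := variants.flatMap (fun v => keys.map (fun k => (k, v))) with hpairsB
  -- STEP 1: A's first dict
  have hbfA : (keys.foldl (fun acc k =>
      variants.foldl (fun acc2 v => acc2.insert (k ++ "_" ++ v) (d.getD k "")) acc)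
      PySem.Dict.empty) = pairsA.foldl pstep PySem.Dict.empty := by
    rw [hpairsA, List.foldl_flatMap]
    refine PySem.List.foldl_congr_mem _ _ _ _ ?_
    intro acc k _
    rw [List.foldl_map]
  -- injectivity of comp on pairs with first component from keys
  have hinj : ∀ (p : String × String), p.1 ∈ keys → ∀ (q : String × String), q.1 ∈ keys → comp p.1 p.2 = comp q.1 q.2 → p = q := by
    intro p hp q hq he
    have := pvComp_inj p.1 p.2 q.1 q.2 (hkeys_us _ hp) (hkeys_us _ hq) he
    exact Prod.ext this.1 this.2
  -- STEP 1b: items of A's first dict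
  have hitemsA : (pairsA.foldl pstep PySem.Dict.empty).items
      = keys.flatMap (fun k => dvL.map (fun v => (comp k v, val k))) := by
    rw [pvDict_foldl_insert_items (fun p => comp p.1 p.2) (fun p => val p.1) pairsA
      PySem.Dict.empty [] (by simp [PySem.Dict.keys_empty])
      (by intro p _; simp [PySem.Dict.contains_empty])
      (by
        intro p hp q hq he
        have hp1 : p.1 ∈ keys := by
          rcases List.mem_flatMap.1 hp with ⟨k, hkm, hpm⟩
          rcases List.mem_map.1 hpm with ⟨v, _, rfl⟩
          exact hkm
        have hq1 : q.1 ∈ keys := by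
          rcases List.mem_flatMap.1 hq with ⟨k, hkm, hqm⟩
          rcases List.mem_map.1 hqm with ⟨v, _, rfl⟩
          exact hkm
        exact hinj p hp1 q hq1 he)
      (by simp)]
    rw [pvNew_prodA variants keys [] hkeys_nd (by simp)]
    simp only [show PySem.Dict.empty.items = [] from rfl, List.nil_append, List.map_flatMap, List.map_map]
    rfl
  -- STEP 2: items of B's dict
  have hitemsB : (pairsB.foldl pstep PySem.Dict.empty).items
      = dvL.flatMap (fun v => keys.map (fun k => (comp k v, val k))) := by
    rw [pvDict_foldl_insert_items (fun p => comp p.1 p.2) (fun p => val p.1) pairsB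
      PySem.Dict.empty [] (by simp [PySem.Dict.keys_empty])
      (by intro p _; simp [PySem.Dict.contains_empty])
      (by
        intro p hp q hq he
        have hp1 : p.1 ∈ keys := by
          rcases List.mem_flatMap.1 hp with ⟨v, _, hpm⟩
          rcases List.mem_map.1 hpm with ⟨k, hkm, rfl⟩
          exact hkm
        have hq1 : q.1 ∈ keys := by
          rcases List.mem_flatMap.1 hq with ⟨v, _, hqm⟩
          rcases List.mem_map.1 hqm with ⟨k, hkm, rfl⟩
          exact hkm
        exact hinj p hp1 q hq1 he)
      (by simp)]
    rw [pvNew_prodB keys hkeys_nd variants [] [] (by simp)]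
    simp only [show PySem.Dict.empty.items = [] from rfl, List.nil_append, List.map_flatMap, List.map_map]
    rfl
  -- STEP 2b: rewrite B's nested fold
  have hbfB : (variants.foldl (fun acc v =>
      keys.foldl (fun acc2 k => acc2.insert (k ++ "_" ++ v) (d.getD k "")) acc)
      PySem.Dict.empty) = pairsB.foldl pstep PySem.Dict.empty := by
    rw [hpairsB, List.foldl_flatMap]
    refine PySem.List.foldl_congr_mem _ _ _ _ ?_
    intro acc v _
    rw [List.foldl_map]
  rw [hbfA, hbfB]
  set bfA := pairsA.foldl pstep PySem.Dict.empty with hbfAdef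
  set bfB := pairsB.foldl pstep PySem.Dict.empty with hbfBdef
  set M := keys.length + 1 with hM
  set k1p : String → Nat := fun x =>
    (PySem.List.index? variants (PySem.List.pyGetD ((PySem.Str.split? x "_").getD []) 1 "")).getD 0 with hk1pd
  set k2p : String → Nat := fun x =>
    (PySem.List.index? keys (PySem.List.pyGetD ((PySem.Str.split? x "_").getD []) 0 "")).getD 0 with hk2pd
  set K : String → Nat := fun x => k1p x * M + k2p x with hKd
  set xsK := keys.flatMap (fun k => dvL.map (fun v => comp k v)) with hxsK
  set ys := dvL.flatMap (fun v => keys.map (fun k => comp k v)) with hys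
  -- key-function evaluation on composites
  have hsplit : ∀ k ∈ keys, ∀ v ∈ variants,
      (PySem.Str.split? (comp k v) "_").getD [] = [k, v] := by
    intro k hkm v hvm
    exact pvSplit_comp k v (hkeys_us k hkm) (hv v hvm)
  have hk1v : ∀ k ∈ keys, ∀ v ∈ variants, k1p (comp k v) = variants.idxOf v := by
    intro k hkm v hvm
    show (PySem.List.index? variants (PySem.List.pyGetD ((PySem.Str.split? (comp k v) "_").getD []) 1 "")).getD 0 = _
    rw [hsplit k hkm v hvm]
    rw [show PySem.List.pyGetD [k, v] 1 "" = v from by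
      simp [PySem.List.pyGetD, PySem.List.pyGet?, PySem.List.pyIdx?]]
    exact pvIdx_getD variants v hvm
  have hk2v : ∀ k ∈ keys, ∀ v ∈ variants, k2p (comp k v) = keys.idxOf k := by
    intro k hkm v hvm
    show (PySem.List.index? keys (PySem.List.pyGetD ((PySem.Str.split? (comp k v) "_").getD []) 0 "")).getD 0 = _
    rw [hsplit k hkm v hvm]
    rw [show PySem.List.pyGetD [k, v] 0 "" = k from by
      simp [PySem.List.pyGetD, PySem.List.pyGet?, PySem.List.pyIdx?]]
    exact pvIdx_getD keys k hkm
  have hk2bound : ∀ k ∈ keys, ∀ v ∈ variants, k2p (comp k v) < M := by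
    intro k hkm v hvm
    rw [hk2v k hkm v hvm, hM]
    have := List.idxOf_lt_length_of_mem hkm
    omega
  -- pairwise orders
  have hkeysPW : keys.Pairwise (fun a b => keys.idxOf a < keys.idxOf b) := by
    have h1 := pvNew_pairwise_idx keys []
    rwa [pvNew_of_nodup keys [] hkeys_nd (by simp)] at h1
  have hdvLPW : dvL.Pairwise (fun a b => variants.idxOf a < variants.idxOf b) :=
    pvNew_pairwise_idx variants []
  have hysPW : ys.Pairwise (fun a b => K a < K b) := by
    rw [hys, List.flatMap_def]
    rw [List.pairwise_flatten]
    constructor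
    · intro l hl
      rcases List.mem_map.1 hl with ⟨v, hvm, rfl⟩
      rw [List.pairwise_map]
      refine hkeysPW.imp_of_mem ?_
      intro a b ha hb hab
      rw [hKd]
      simp only []
      rw [hk1v a ha v (hdvL_mem v hvm), hk1v b hb v (hdvL_mem v hvm),
        hk2v a ha v (hdvL_mem v hvm), hk2v b hb v (hdvL_mem v hvm)]
      omega
    · rw [List.pairwise_map]
      refine hdvLPW.imp_of_mem ?_
      intro v w hvm hwm hvw x hx y hy
      rcases List.mem_map.1 hx with ⟨a, ha, rfl⟩
      rcases List.mem_map.1 hy with ⟨b, hb, rfl⟩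
      rw [hKd]
      simp only []
      rw [hk1v a ha v (hdvL_mem v hvm), hk1v b hb w (hdvL_mem w hwm),
        hk2v a ha v (hdvL_mem v hvm), hk2v b hb w (hdvL_mem w hwm)]
      refine (pvLex_arith _ _ _ _ M ?_ ?_).1 (Or.inl hvw)
      · have := List.idxOf_lt_length_of_mem ha; omega
      · have := List.idxOf_lt_length_of_mem hb; omega
  have hysNodup : ys.Nodup := hysPW.imp (fun {a b} h => fun e => by subst e; omega)
  have hxsKPW : xsK.Pairwise (fun a b =>
      k2p a * (variants.length + 1) + k1p a < k2p b * (variants.length + 1) + k1p b) := by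
    rw [hxsK, List.flatMap_def, List.pairwise_flatten]
    constructor
    · intro l hl
      rcases List.mem_map.1 hl with ⟨k, hkm, rfl⟩
      rw [List.pairwise_map]
      refine hdvLPW.imp_of_mem ?_
      intro a b ha hb hab
      rw [hk1v k hkm a (hdvL_mem a ha), hk1v k hkm b (hdvL_mem b hb),
        hk2v k hkm a (hdvL_mem a ha), hk2v k hkm b (hdvL_mem b hb)]
      omega
    · rw [List.pairwise_map]
      refine hkeysPW.imp_of_mem ?_
      intro k k' hkm hkm' hkk x hx y hy
      rcases List.mem_map.1 hx with ⟨a, ha, rfl⟩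
      rcases List.mem_map.1 hy with ⟨b, hb, rfl⟩
      rw [hk1v k hkm a (hdvL_mem a ha), hk1v k' hkm' b (hdvL_mem b hb),
        hk2v k hkm a (hdvL_mem a ha), hk2v k' hkm' b (hdvL_mem b hb)]
      refine (pvLex_arith _ _ _ _ (variants.length + 1) ?_ ?_).1 (Or.inl hkk)
      · have := List.idxOf_lt_length_of_mem (hdvL_mem a ha); omega
      · have := List.idxOf_lt_length_of_mem (hdvL_mem b hb); omega
  have hxsKNodup : xsK.Nodup := hxsKPW.imp (fun {a b} h => fun e => by subst e; omega)
  have hperm : ys.Perm xsK := by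
    refine List.perm_of_nodup_nodup_toFinset_eq hysNodup hxsKNodup ?_
    ext x
    simp only [List.mem_toFinset, hys, hxsK, List.mem_flatMap, List.mem_map]
    constructor
    · rintro ⟨v, hvm, k, hkm, rfl⟩
      exact ⟨k, hkm, v, hvm, rfl⟩
    · rintro ⟨k, hkm, v, hvm, rfl⟩
      exact ⟨v, hvm, k, hkm, rfl⟩
  -- keys of the first dict
  have hkeys_eq : ∀ (dd : PySem.Dict String String), dd.keys = dd.items.map Prod.fst := fun _ => rfl
  have hbfAkeys : bfA.keys = xsK := by
    rw [hkeys_eq, hitemsA, hxsK]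
    simp only [List.map_flatMap, List.map_map]
    rfl
  have hbfAkeysNodup : bfA.keys.Nodup := by rw [hbfAkeys]; exact hxsKNodup
  -- the sort produces exactly B's key order
  have hK' : ∀ a ∈ xsK, ∀ b ∈ xsK,
      (decide (k1p a < k1p b) || !decide (k1p b < k1p a) && decide (k2p a < k2p b))
        = decide (K a < K b) := by
    intro a ha b hb
    rcases List.mem_flatMap.1 ha with ⟨k, hkm, ham⟩
    rcases List.mem_map.1 ham with ⟨v, hvm, rfl⟩
    rcases List.mem_flatMap.1 hb with ⟨k', hkm', hbm⟩
    rcases List.mem_map.1 hbm with ⟨v', hvm', rfl⟩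
    rw [hKd]
    exact pvLex_bool _ _ _ _ M
      (hk2bound k hkm v (hdvL_mem v hvm)) (hk2bound k' hkm' v' (hdvL_mem v' hvm'))
  have hsorted : PySem.List.sorted2 bfA.keys k1p k2p = ys := by
    rw [hbfAkeys, pvSorted2_eq_sorted xsK k1p k2p K hK']
    exact PySem.List.sorted_eq_of_perm_of_pairwise_lt xsK ys K hperm hysPW
  rw [hsorted]
  -- final rebuild in sorted order
  have hfinal : ((ys.foldl (fun acc k => acc.insert k (bfA.getD k "")) PySem.Dict.empty)).items
      = ys.map (fun k => (k, bfA.getD k "")) := by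
    have := PySem.Dict.items_foldl_insert_fresh (l := ys) (k := fun a => a)
      (v := fun k => bfA.getD k "") (d := PySem.Dict.empty)
      (by intro a _; simp [PySem.Dict.contains_empty]) (by simpa using hysNodup)
    simpa using this
  rw [hfinal, hitemsB]
  rw [hys]
  simp only [List.map_flatMap, List.map_map]
  refine List.flatMap_congr ?_
  intro v hvm
  refine List.map_congr_left ?_
  intro k hkm
  simp only [Function.comp_apply]
  congr 1
  refine PySem.Dict.getD_of_mem_items bfA ?_ hbfAkeysNodup ""
  rw [hitemsA]
  exact List.mem_flatMap.2 ⟨k, hkm, List.mem_map.2 ⟨v, hvm, rfl⟩⟩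

-- ===== VERDICT (by name: the statement is the Claim_ definition above) =====
theorem get_beamformers_names_spec : Claim_equal_get_beamformers_names := by
  intro orig variants _ hpre
  rcases hpre with rfl | hpre
  · show get_beamformers_names [] variants = get_beamformers_names_alt [] variants
    unfold get_beamformers_names get_beamformers_names_alt
    simp [PySem.List.sorted2, PySem.Dict.ofList, PySem.Dict.update, PySem.Dict.empty, PySem.Dict.keys]
  · rcases hpre with rfl | hpre
    · show get_beamformers_names orig [] = get_beamformers_names_alt orig []
      unfold get_beamformers_names get_beamformers_names_alt
      simp [PySem.List.sorted2, PySem.Dict.ofList, PySem.Dict.update, PySem.Dict.empty, PySem.Dict.keys]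
    · exact pv_main orig variants hpre.1 hpre.2
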